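-- pv_equiv track=rewrite | github.com/Alfredo-Cerda-Vaca/Projects | TMS_ETL/db.py | cleanup_string
-- ===== SOURCE A (Python) =====
-- import unicodedata
--
-- def cleanup_string(input_str: str) -> str:
-- 	"""Remove Unicode control characters and
-- 	trailing whitespace."""
-- 	# Remove control characters
-- 	output_str = "".join(
-- 		char for char in input_str if unicodedata.category(char) != 'Cc'
-- 	)
-- 	# Remove new lines and carriage return
-- 	output_str = \
-- 		''.join(line.strip() for line in output_str.split('\n'))
-- 	output_str = \
-- 		''.join(line.strip() for line in output_str.split('\r'))
-- 	# Remove duplicated whitespacing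
-- 	output_str = ' '.join(output_str.split())
-- 	output_str = output_str.strip()
-- 	return output_str
-- ===== SOURCE B (Python) =====
-- import unicodedata
--
-- def cleanup_string(input_str: str) -> str:
--     out = []
--     pending = False
--     for ch in input_str:
--         if unicodedata.category(ch) == 'Cc':
--             continue
--         if ch.isspace():
--             if out:
--                 pending = True
--         else:
--             if pending:
--                 out.append(' ')
--                 pending = False
--             out.append(ch)
--     return ''.join(out)
-- ===== Notes on version B (the rewrite author's own statement) =====
-- stated objective: simpler
-- what changed: A builds four intermediate strings (filter control chars, split/strip/join on newline, again on carriage return, then a whitespace split/join plus a final strip); B makes a single left-to-right pass with an output buffer and a pending-space flag that drops control characters and collapses/trims whitespace as it goes.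
import Mathlib
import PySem

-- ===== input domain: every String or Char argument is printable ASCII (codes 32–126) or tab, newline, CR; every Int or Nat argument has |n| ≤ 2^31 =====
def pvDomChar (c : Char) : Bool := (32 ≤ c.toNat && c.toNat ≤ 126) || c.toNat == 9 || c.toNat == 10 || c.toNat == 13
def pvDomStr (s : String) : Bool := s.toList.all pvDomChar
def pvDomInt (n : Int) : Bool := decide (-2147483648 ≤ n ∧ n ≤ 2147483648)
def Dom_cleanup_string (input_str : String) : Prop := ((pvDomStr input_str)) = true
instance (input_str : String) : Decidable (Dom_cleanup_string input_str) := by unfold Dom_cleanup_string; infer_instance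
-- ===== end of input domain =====

-- B replaces A's four join/split/strip passes by one left-to-right pass with a pending-space flag (objective: simpler/one traversal); return values proved equal on Dom.

-- unicodedata.category(c) == 'Cc' — exact on the ASCII range of Dom (Cc there is U+0000–U+001F and U+007F)
def pyIsCc (c : Char) : Bool := c.toNat < 32 || c.toNat == 127

-- ===== PORT A =====
def cleanup_string (input_str : String) : String :=
  -- "".join(char for char in input_str if category(char) != 'Cc')
  let s1 := input_str.toList.filter (fun c => !(pyIsCc c))
  -- ''.join(line.strip() for line in output_str.split('\n'))
  let s2 := PySem.Chars.join [] ((PySem.Chars.splitOn s1 ['\n']).map PySem.Chars.strip)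
  -- ''.join(line.strip() for line in output_str.split('\r'))
  let s3 := PySem.Chars.join [] ((PySem.Chars.splitOn s2 ['\r']).map PySem.Chars.strip)
  -- ' '.join(output_str.split())
  let s4 := PySem.Chars.join [' '] (PySem.Chars.split₀ s3)
  -- output_str.strip()
  String.ofList (PySem.Chars.strip s4)

-- ===== PORT B =====
-- the loop of Source B: out = emitted chars (appended at the end), pending = a space is owed
def cleanupGo : List Char → List Char → Bool → List Char
  | [], out, _ => out
  | c :: rest, out, pending =>
    if pyIsCc c then cleanupGo rest out pending
    else if PySem.Chars.isspace c then
      cleanupGo rest out (if out.isEmpty then pending else true)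
    else
      cleanupGo rest (out ++ (if pending then [' ', c] else [c])) false

def cleanup_string_alt (input_str : String) : String :=
  String.ofList (cleanupGo input_str.toList [] false)

-- ===== PRECONDITION & SPEC =====
def Spec_cleanup_string (input_str : String) (out : String) : Prop := out = cleanup_string_alt input_str
instance (input_str : String) (out : String) : Decidable (Spec_cleanup_string input_str out) := by unfold Spec_cleanup_string; infer_instance

-- ===== CLAIM (what is proved, stated in full; the proofs are below) =====
def Claim_equal_cleanup_string : Prop := ∀ (input_str : String), Dom_cleanup_string input_str → Spec_cleanup_string input_str (cleanup_string input_str)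

-- ===== LEMMAS AND PROOFS =====

-- words of a string, accumulator = current word reversed (split₀.go without the acc argument)
def wordsAux : List Char → List Char → List (List Char)
  | [], cur => if cur = [] then [] else [cur.reverse]
  | c :: r, cur =>
    if PySem.Chars.isspace c then
      if cur = [] then wordsAux r [] else cur.reverse :: wordsAux r []
    else wordsAux r (c :: cur)

-- ' '.join written structurally
def sj : List (List Char) → List Char
  | [] => []
  | [w] => w
  | w :: b :: t => w ++ ' ' :: sj (b :: t)

-- what cleanupGo appends after a nonempty prefix has been emitted
def restGo : List Char → Bool → List Char
  | [], _ => []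
  | c :: r, p =>
    if pyIsCc c then restGo r p
    else if PySem.Chars.isspace c then restGo r true
    else (if p then [' ', c] else [c]) ++ restGo r false

theorem mem_takeWhile_pred {p : Char → Bool} {l : List Char} {c : Char}
    (h : c ∈ l.takeWhile p) : p c = true := by
  induction l with
  | nil => simp at h
  | cons a t ih =>
    by_cases hp : p a
    · rw [List.takeWhile_cons_of_pos hp] at h
      rcases List.mem_cons.mp h with h1 | h1
      · exact h1 ▸ hp
      · exact ih h1
    · rw [List.takeWhile_cons_of_neg (by simpa using hp)] at h; simp at h

theorem mem_strip {s : List Char} {c : Char} (h : c ∈ PySem.Chars.strip s) : c ∈ s := by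
  simp only [PySem.Chars.strip, PySem.Chars.rstrip, PySem.Chars.lstrip] at h
  have h1 := (List.dropWhile_sublist (l := (List.dropWhile PySem.Chars.isspace s).reverse)
      (p := PySem.Chars.isspace)).mem (by simpa using h)
  have h2 := (List.dropWhile_sublist (l := s) (p := PySem.Chars.isspace)).mem (by simpa using h1)
  exact h2

-- splitOn with a one-char separator not occurring in the string
theorem splitOn_go_not_mem (c0 : Char) :
    ∀ (fuel : Nat) (l cur : List Char) (acc : List (List Char)),
      l.length < fuel → c0 ∉ l →
      PySem.Chars.splitOn.go [c0] fuel l cur acc = ((cur.reverse ++ l) :: acc).reverse := by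
  intro fuel
  induction fuel with
  | zero => intro l cur acc h _; exact absurd h (by omega)
  | succ n ih =>
    intro l cur acc hlen hmem
    cases l with
    | nil => simp [PySem.Chars.splitOn.go]
    | cons c rest =>
      have hne : ¬ ([c0].isPrefixOf (c :: rest) = true) := by
        simp only [List.isPrefixOf]
        intro hc
        have hceq : c0 = c := by simpa using hc
        exact hmem (by simp [hceq])
      simp only [PySem.Chars.splitOn.go, if_neg hne]
      rw [ih rest (c :: cur) acc (by simpa using Nat.lt_of_succ_lt_succ hlen)
            (fun h => hmem (List.mem_cons_of_mem _ h))]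
      simp

theorem splitOn_not_mem (c0 : Char) (l : List Char) (hmem : c0 ∉ l) :
    PySem.Chars.splitOn l [c0] = [l] := by
  simp only [PySem.Chars.splitOn]
  rw [splitOn_go_not_mem c0 (l.length + 1) l [] [] (by omega) hmem]
  simp

-- split₀.go in terms of wordsAux
theorem split₀_go_eq (s : List Char) :
    ∀ (cur : List Char) (acc : List (List Char)),
      PySem.Chars.split₀.go s cur acc = acc.reverse ++ wordsAux s cur := by
  induction s with
  | nil =>
    intro cur acc
    by_cases h : cur = [] <;> simp [PySem.Chars.split₀.go, wordsAux, h]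
  | cons c r ih =>
    intro cur acc
    by_cases hs : PySem.Chars.isspace c
    · by_cases hc : cur = [] <;>
        simp [PySem.Chars.split₀.go, wordsAux, hs, hc, ih]
    · simp [PySem.Chars.split₀.go, wordsAux, hs, ih]

theorem split₀_eq (s : List Char) : PySem.Chars.split₀ s = wordsAux s [] := by
  simp [PySem.Chars.split₀, split₀_go_eq]

-- wordsAux ignores leading whitespace
theorem wordsAux_lstrip (s : List Char) :
    wordsAux (PySem.Chars.lstrip s) [] = wordsAux s [] := by
  induction s with
  | nil => rfl
  | cons c r ih =>
    by_cases hs : PySem.Chars.isspace c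
    · simpa [PySem.Chars.lstrip, List.dropWhile_cons_of_pos hs, wordsAux, hs]
        using ih
    · simp [PySem.Chars.lstrip, List.dropWhile_cons_of_neg hs]

-- an all-whitespace string has no words
theorem wordsAux_spaces_nil (t : List Char) (hsp : ∀ c ∈ t, PySem.Chars.isspace c = true) :
    wordsAux t [] = [] := by
  induction t with
  | nil => rfl
  | cons c r ih =>
    simp [wordsAux, hsp c (by simp), ih (fun c h => hsp c (by simp [h]))]

-- wordsAux ignores trailing whitespace
theorem wordsAux_append_spaces (t : List Char) (hsp : ∀ c ∈ t, PySem.Chars.isspace c = true) :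
    ∀ (s cur : List Char), wordsAux (s ++ t) cur = wordsAux s cur := by
  intro s
  induction s with
  | nil =>
    intro cur
    cases t with
    | nil => simp
    | cons c r =>
      have hc : PySem.Chars.isspace c := hsp c (by simp)
      by_cases hcur : cur = []
      · subst hcur
        simpa [wordsAux, hc] using wordsAux_spaces_nil r (fun c h => hsp c (by simp [h]))
      · simp [wordsAux, hc, hcur, wordsAux_spaces_nil r (fun c h => hsp c (by simp [h]))]
  | cons c r ih =>
    intro cur
    by_cases hs : PySem.Chars.isspace c
    · by_cases hc : cur = [] <;> simp [wordsAux, hs, hc, ih]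
    · simp [wordsAux, hs, ih]

theorem wordsAux_rstrip (s : List Char) :
    wordsAux (PySem.Chars.rstrip s) [] = wordsAux s [] := by
  have hdecomp : PySem.Chars.rstrip s ++ (s.reverse.takeWhile PySem.Chars.isspace).reverse = s := by
    simp only [PySem.Chars.rstrip]
    rw [← List.reverse_append, List.takeWhile_append_dropWhile ..]
    · simp
  have hsp : ∀ c ∈ (s.reverse.takeWhile PySem.Chars.isspace).reverse, PySem.Chars.isspace c = true := by
    intro c hc
    exact mem_takeWhile_pred (by simpa using hc)
  conv_rhs => rw [← hdecomp]
  rw [wordsAux_append_spaces _ hsp]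

theorem wordsAux_strip (s : List Char) :
    wordsAux (PySem.Chars.strip s) [] = wordsAux s [] := by
  simp only [PySem.Chars.strip]
  rw [wordsAux_rstrip, wordsAux_lstrip]

-- ' '.join equals sj
theorem join_eq_sj (ws : List (List Char)) : PySem.Chars.join [' '] ws = sj ws := by
  induction ws with
  | nil => simp [PySem.Chars.join_nil, sj]
  | cons w ws ih =>
    cases ws with
    | nil => simp [PySem.Chars.join_singleton, sj]
    | cons b t =>
      rw [PySem.Chars.join_cons_cons, ih]
      simp [sj]

-- every word produced is nonempty and whitespace-free
theorem wordsAux_good (s : List Char) :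
    ∀ (cur : List Char), (∀ c ∈ cur, PySem.Chars.isspace c = false) →
      ∀ w ∈ wordsAux s cur, w ≠ [] ∧ ∀ c ∈ w, PySem.Chars.isspace c = false := by
  induction s with
  | nil =>
    intro cur hcur w hw
    by_cases hc : cur = [] <;> simp [wordsAux, hc] at hw
    subst hw
    exact ⟨by simpa using hc, fun c hc' => hcur c (by simpa using hc')⟩
  | cons c r ih =>
    intro cur hcur w hw
    by_cases hs : PySem.Chars.isspace c
    · by_cases hc : cur = []
      · exact ih [] (by simp) w (by simpa [wordsAux, hs, hc] using hw)
      · rcases List.mem_cons.mp (by simpa [wordsAux, hs, hc] using hw) with h1 | h1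
        · subst h1
          exact ⟨by simpa using hc, fun c hc' => hcur c (by simpa using hc')⟩
        · exact ih [] (by simp) w h1
    · refine ih (c :: cur) ?_ w (by simpa [wordsAux, hs] using hw)
      intro d hd
      rcases List.mem_cons.mp hd with h1 | h1
      · subst h1; simpa using hs
      · exact hcur d h1

-- a good word list joins to a string with no leading/trailing whitespace
theorem sj_head (ws : List (List Char)) (hws : ∀ w ∈ ws, w ≠ [] ∧ ∀ c ∈ w, PySem.Chars.isspace c = false)
    (hne : ws ≠ []) : ∃ c t, sj ws = c :: t ∧ PySem.Chars.isspace c = false := by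
  cases ws with
  | nil => exact absurd rfl hne
  | cons w ws =>
    obtain ⟨hwne, hwsp⟩ := hws w (by simp)
    obtain ⟨c, t, rfl⟩ := List.exists_cons_of_ne_nil hwne
    cases ws with
    | nil => exact ⟨c, t, by simp [sj], hwsp c (by simp)⟩
    | cons b u => exact ⟨c, t ++ ' ' :: sj (b :: u), by simp [sj], hwsp c (by simp)⟩

theorem sj_last (ws : List (List Char)) (hws : ∀ w ∈ ws, w ≠ [] ∧ ∀ c ∈ w, PySem.Chars.isspace c = false)
    (hne : ws ≠ []) : ∃ c t, (sj ws).reverse = c :: t ∧ PySem.Chars.isspace c = false := by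
  induction ws with
  | nil => exact absurd rfl hne
  | cons w ws ih =>
    cases ws with
    | nil =>
      obtain ⟨hwne, hwsp⟩ := hws w (by simp)
      have : w.reverse ≠ [] := by simpa using hwne
      obtain ⟨c, t, hct⟩ := List.exists_cons_of_ne_nil this
      exact ⟨c, t, by simpa [sj] using hct,
        hwsp c (by rw [← List.mem_reverse]; simp [hct])⟩
    | cons b u =>
      obtain ⟨c, t, hct, hc⟩ := ih (fun w hw => hws w (by simp [hw])) (by simp)
      exact ⟨c, t ++ ' ' :: w.reverse, by simp [sj, hct], hc⟩

theorem strip_sj (ws : List (List Char))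
    (hws : ∀ w ∈ ws, w ≠ [] ∧ ∀ c ∈ w, PySem.Chars.isspace c = false) :
    PySem.Chars.strip (sj ws) = sj ws := by
  cases hne : ws with
  | nil => simp [sj, PySem.Chars.strip, PySem.Chars.lstrip, PySem.Chars.rstrip]
  | cons w ws' =>
    rw [← hne]
    obtain ⟨c, t, hct, hc⟩ := sj_head ws hws (by simp [hne])
    obtain ⟨d, u, hdu, hd⟩ := sj_last ws hws (by simp [hne])
    simp only [PySem.Chars.strip, PySem.Chars.lstrip, PySem.Chars.rstrip]
    rw [hct, List.dropWhile_cons_of_neg (by simp [hc]), ← hct, hdu,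
      List.dropWhile_cons_of_neg (by simp [hd]), ← hdu, List.reverse_reverse]

-- cleanupGo after a nonempty prefix: the emitted prefix is frozen
theorem cleanupGo_append (s : List Char) :
    ∀ (out : List Char) (p : Bool), out ≠ [] →
      cleanupGo s out p = out ++ restGo s p := by
  induction s with
  | nil => intro out p h; simp [cleanupGo, restGo]
  | cons c r ih =>
    intro out p h
    by_cases hcc : pyIsCc c
    · simp [cleanupGo, restGo, hcc, ih out p h]
    · by_cases hs : PySem.Chars.isspace c
      · have : out.isEmpty = false := by simpa using h
        simp [cleanupGo, restGo, hcc, hs, this, ih out true h]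
      · rw [cleanupGo, if_neg hcc, if_neg hs,
          restGo, if_neg hcc, if_neg hs,
          ih _ false (by cases p <;> simp), List.append_assoc]

-- restGo versus words, on control-free input
theorem wordsAux_ne_nil (s : List Char) :
    ∀ cur, cur ≠ [] → wordsAux s cur ≠ [] := by
  induction s with
  | nil => intro cur h; simp [wordsAux, h]
  | cons c r ih =>
    intro cur h
    by_cases hs : PySem.Chars.isspace c
    · simp [wordsAux, hs, h]
    · exact by simpa [wordsAux, hs] using ih (c :: cur) (by simp)

theorem restGo_words (s : List Char) (hcc : ∀ c ∈ s, pyIsCc c = false) :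
    (restGo s true = if wordsAux s [] = [] then [] else ' ' :: sj (wordsAux s []))
    ∧ (∀ cur, cur ≠ [] → sj (wordsAux s cur) = cur.reverse ++ restGo s false) := by
  induction s with
  | nil =>
    refine ⟨by simp [restGo, wordsAux], ?_⟩
    intro cur h
    simp [wordsAux, restGo, h, sj]
  | cons c r ih =>
    have hc : pyIsCc c = false := hcc c (by simp)
    obtain ⟨ih1, ih2⟩ := ih (fun c h => hcc c (by simp [h]))
    by_cases hs : PySem.Chars.isspace c
    · refine ⟨by simpa [restGo, wordsAux, hc, hs] using ih1, ?_⟩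
      intro cur h
      rw [wordsAux, if_pos hs, if_neg h, restGo, if_neg (by simp [hc]), if_pos hs, ih1]
      by_cases hw : wordsAux r [] = []
      · simp [hw, sj]
      · obtain ⟨b, u, hbu⟩ := List.exists_cons_of_ne_nil hw
        simp [hbu, sj]
    · constructor
      · rw [restGo, if_neg (by simp [hc]), if_neg hs,
          wordsAux, if_neg hs]
        rw [if_neg (wordsAux_ne_nil r [c] (by simp)),
          ih2 [c] (by simp)]
        simp
      · intro cur h
        rw [wordsAux, if_neg hs, restGo, if_neg (by simp [hc]),
          if_neg hs, ih2 (c :: cur) (by simp)]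
        simp

-- the whole loop on control-free input
theorem cleanupGo_eq_sj_words (s : List Char) (hcc : ∀ c ∈ s, pyIsCc c = false) :
    cleanupGo s [] false = sj (wordsAux s []) := by
  induction s with
  | nil => simp [cleanupGo, wordsAux, sj]
  | cons c r ih =>
    have hc : pyIsCc c = false := hcc c (by simp)
    by_cases hs : PySem.Chars.isspace c
    · simpa [cleanupGo, wordsAux, hc, hs] using ih (fun c h => hcc c (by simp [h]))
    · rw [cleanupGo, if_neg (by simp [hc]), if_neg hs,
        wordsAux, if_neg hs]
      simp only [Bool.false_eq_true, if_false, List.nil_append]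
      rw [cleanupGo_append r [c] false (by simp),
        (restGo_words r (fun c h => hcc c (by simp [h]))).2 [c] (by simp)]
      simp

-- cleanupGo skips exactly the control characters the filter removes
theorem cleanupGo_filter (s : List Char) :
    ∀ out p, cleanupGo s out p = cleanupGo (s.filter (fun c => !(pyIsCc c))) out p := by
  induction s with
  | nil => intro out p; rfl
  | cons c r ih =>
    intro out p
    by_cases hcc : pyIsCc c
    · simp [cleanupGo, hcc, ih]
    · simp [cleanupGo, hcc, ih]

-- ===== VERDICT (by name: the statement is the Claim_ definition above) =====
theorem cleanup_string_spec : Claim_equal_cleanup_string := by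
  intro input_str _
  unfold Spec_cleanup_string cleanup_string cleanup_string_alt
  simp only []
  set s1 := input_str.toList.filter (fun c => !(pyIsCc c)) with hs1
  have hcc : ∀ c ∈ s1, pyIsCc c = false := by
    intro c hc
    have := List.of_mem_filter hc
    simpa using this
  have hno : ∀ (c0 : Char), c0.toNat < 32 → c0 ∉ s1 := by
    intro c0 h0 hmem
    have := hcc c0 hmem
    simp [pyIsCc, h0] at this
  have h2 : PySem.Chars.join [] ((PySem.Chars.splitOn s1 ['\n']).map PySem.Chars.strip)
      = PySem.Chars.strip s1 := by
    rw [splitOn_not_mem '\n' s1 (hno '\n' (by decide))]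
    simp [PySem.Chars.join_singleton]
  have h3 : PySem.Chars.join [] ((PySem.Chars.splitOn (PySem.Chars.strip s1) ['\r']).map PySem.Chars.strip)
      = PySem.Chars.strip (PySem.Chars.strip s1) := by
    rw [splitOn_not_mem '\r' _ (fun hm => hno '\r' (by decide) (mem_strip hm))]
    simp [PySem.Chars.join_singleton]
  rw [h2, h3, split₀_eq, wordsAux_strip, wordsAux_strip, join_eq_sj,
    strip_sj _ (wordsAux_good s1 [] (by simp)),
    cleanupGo_filter, ← hs1, cleanupGo_eq_sj_words s1 hcc]
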